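-- pv_equiv track=rewrite | github.com/khush-01/Python-codes | HackerRank/Mathematics/Fundamentals/Easy/Best Divisor.py | bestdiv
-- ===== SOURCE A (Python) =====
-- def sum(n):
-- 	s = str(n)
-- 	sum = 0
-- 	for x in s:
-- 		sum += int(x)
-- 	return sum
--
-- def bestdiv(arr):
-- 	best = 100000
-- 	bsum = 1
-- 	for x in arr:
-- 		add = sum(x)
-- 		if add > bsum:
-- 			best = x
-- 			bsum = add
-- 		elif add == bsum:
-- 			best = min(best, x)
-- 			bsum = add
-- 	return best
-- ===== SOURCE B (Python) =====
-- def bestdiv(arr):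
--     def dsum(n):
--         s = 0
--         while n > 0:
--             s += n % 10
--             n //= 10
--         return s
--     m = max(dsum(x) for x in arr)
--     return min(x for x in arr if dsum(x) == m)
-- ===== Notes on version B (the rewrite author's own statement) =====
-- stated objective: alternative
-- what changed: Replaces the single accumulating best/bsum fold over string-converted digit sums with an arithmetic digit sum and two plain passes (find the maximal digit sum, then return the smallest element attaining it); Pre_ excludes negative elements (A raises ValueError) and the empty list (B's max() raises there while A returns its initial value).
-- intended difference: On nonempty lists whose elements are all 0 or powers of ten above 100000 (digit sum at most 1, no element at or below 100000 with digit sum 1), A returns its leftover initial value 100000, which is not even an element of the list; B returns the smallest element with maximal digit sum, the intended answer. — e.g. on bestdiv([0]): A returns 100000, B returns 0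
-- outside the precondition, e.g. on bestdiv([]): A returns 100000, B raises ValueError
import Mathlib
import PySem

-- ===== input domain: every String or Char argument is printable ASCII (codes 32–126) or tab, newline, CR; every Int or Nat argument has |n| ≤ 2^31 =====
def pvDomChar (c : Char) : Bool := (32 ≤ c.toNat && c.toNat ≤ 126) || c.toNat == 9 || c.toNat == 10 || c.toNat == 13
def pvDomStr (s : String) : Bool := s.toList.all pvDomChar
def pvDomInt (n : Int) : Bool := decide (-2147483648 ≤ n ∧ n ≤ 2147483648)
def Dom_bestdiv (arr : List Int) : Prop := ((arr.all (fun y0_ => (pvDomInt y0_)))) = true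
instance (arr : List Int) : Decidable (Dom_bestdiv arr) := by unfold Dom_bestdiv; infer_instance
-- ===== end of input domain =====

-- B replaces A's single best/bsum fold over string-based digit sums by an arithmetic digit
-- sum and two plain passes over arr: the maximal digit sum, then the smallest attainer.
-- Where A's leftover initial value 100000 would be the result, B returns the smallest
-- element of maximal digit sum instead (stated as D_ below).

-- ===== PORT A =====
-- helper `sum` of A: digit sum via str(n); int(x) of a single char, none (= ValueError,
-- reached only for negative n via '-') defaulted to 0 — those inputs are outside Pre_.
def asum (n : Int) : Int :=
  (PySem.Int.toStr n).toList.foldl (fun s c => s + (PySem.Int.ofChars? [c]).getD 0) 0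

def bestdiv (arr : List Int) : Int :=
  (arr.foldl (fun (st : Int × Int) x =>
      let add := asum x
      if add > st.2 then (x, add)
      else if add = st.2 then (min st.1 x, add)
      else st) (100000, 1)).1

-- ===== PORT B =====
-- helper dsum of Source B: while n > 0: s += n % 10; n //= 10
def dsumAlt (n : Int) : Int :=
  if _h : 0 < n then PySem.Int.mod n 10 + dsumAlt (PySem.Int.floordiv n 10) else 0
termination_by n.toNat
decreasing_by
  rw [PySem.Int.floordiv_eq_ediv_of_pos (by omega)]
  omega

def bestdiv_alt (arr : List Int) : Int :=
  -- arr is nonempty under Pre_, so Python's max/min never raise; .getD 0 is unreachable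
  let m := (PySem.List.max? (arr.map dsumAlt) (fun y => y)).getD 0
  (PySem.List.min? (arr.filter (fun x => dsumAlt x == m)) (fun y => y)).getD 0

-- ===== PRECONDITION & SPEC =====
-- A raises ValueError on any negative element (int('-')); on the empty list A returns its
-- initial value while B's max() raises ValueError. Exactly those inputs are excluded.
def Pre_bestdiv (arr : List Int) : Prop := arr ≠ [] ∧ ∀ x ∈ arr, 0 ≤ x
instance (arr : List Int) : Decidable (Pre_bestdiv arr) := by unfold Pre_bestdiv; infer_instance
def pvWitness_bestdiv : List Int := [10, 5]

-- digit sum used only to state D_ (independent of both ports)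
def dsumD (n : Int) : Int := ((Nat.digits 10 n.toNat).sum : Int)

-- On nonempty lists whose elements are all 0 or powers of ten above 100000, A returns its
-- leftover initial value 100000 (not an element of the list); B returns the smallest element
-- with maximal digit sum, the intended answer.
def D_bestdiv (arr : List Int) : Prop :=
  arr ≠ [] ∧ ∀ x ∈ arr, dsumD x ≤ 1 ∧ (dsumD x = 1 → 100000 < x)
instance (arr : List Int) : Decidable (D_bestdiv arr) := by unfold D_bestdiv; infer_instance

def Spec_bestdiv (arr : List Int) (out : Int) : Prop := ¬ D_bestdiv arr → out = bestdiv_alt arr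
instance (arr : List Int) (out : Int) : Decidable (Spec_bestdiv arr out) := by unfold Spec_bestdiv; infer_instance

def pvDiffWitness_bestdiv : List Int := [0]
def pvDiffWitnessOut_bestdiv : Int × Int := (100000, 0)

-- ===== CLAIM (what is proved, stated in full; the proofs are below) =====
def Claim_unchanged_bestdiv : Prop := ∀ (arr : List Int), Dom_bestdiv arr → Pre_bestdiv arr → Spec_bestdiv arr (bestdiv arr)
def Claim_changed_bestdiv : Prop := Dom_bestdiv (pvDiffWitness_bestdiv) ∧ Pre_bestdiv (pvDiffWitness_bestdiv) ∧ D_bestdiv (pvDiffWitness_bestdiv) ∧ bestdiv (pvDiffWitness_bestdiv) = pvDiffWitnessOut_bestdiv.1 ∧ bestdiv_alt (pvDiffWitness_bestdiv) = pvDiffWitnessOut_bestdiv.2 ∧ pvDiffWitnessOut_bestdiv.1 ≠ pvDiffWitnessOut_bestdiv.2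
def Claim_exact_bestdiv : Prop := ∀ (arr : List Int), Dom_bestdiv arr → Pre_bestdiv arr → D_bestdiv arr → bestdiv arr ≠ bestdiv_alt arr

-- ===== LEMMAS AND PROOFS =====

-- value of int(c) for a decimal digit char
lemma ofChars_digitChar (d : Nat) (hd : d < 10) :
    (PySem.Int.ofChars? [Nat.digitChar d]).getD 0 = (d : Int) := by
  interval_cases d <;> decide

-- unfolding of dsumAlt on a Nat cast
lemma dsumAlt_natCast (n : Nat) (hn : 0 < n) :
    dsumAlt (n : Int) = ((n % 10 : Nat) : Int) + dsumAlt ((n / 10 : Nat) : Int) := by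
  rw [dsumAlt]
  simp [hn]

lemma dsumAlt_zero : dsumAlt 0 = 0 := by rw [dsumAlt]; simp

-- digit sum over the chars produced by Nat.toDigitsCore
lemma toDigitsCore_sum : ∀ (fuel n : Nat) (ds : List Char), n < fuel →
    ((Nat.toDigitsCore 10 fuel n ds).map
        (fun c => (PySem.Int.ofChars? [c]).getD 0)).sum
      = dsumAlt (n : Int) +
        ((ds.map (fun c => (PySem.Int.ofChars? [c]).getD 0)).sum) := by
  intro fuel
  induction fuel with
  | zero => intro n ds h; omega
  | succ f ih =>
    intro n ds h
    rw [Nat.toDigitsCore]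
    by_cases h0 : n / 10 = 0
    · simp only [h0, if_true]
      rcases Nat.eq_zero_or_pos n with rfl | hn
      · simp [dsumAlt_zero, ofChars_digitChar 0 (by norm_num)]
      · rw [dsumAlt_natCast n hn, h0]
        simp [dsumAlt_zero, ofChars_digitChar (n % 10) (Nat.mod_lt _ (by norm_num))]
    · simp only [h0, if_false]
      have hn : 0 < n := by
        rcases Nat.eq_zero_or_pos n with rfl | h
        · simp at h0
        · exact h
      have hf : n / 10 < f := by
        have := Nat.div_lt_self hn (by norm_num : 1 < 10)
        omega
      rw [ih (n / 10) _ hf]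
      rw [dsumAlt_natCast n hn]
      simp [ofChars_digitChar (n % 10) (Nat.mod_lt _ (by norm_num))]
      ring

-- A's string digit sum equals B's arithmetic digit sum on nonnegative ints
lemma asum_eq (n : Int) (hn : 0 ≤ n) : asum n = dsumAlt n := by
  unfold asum
  rw [PySem.List.foldl_add]
  have htl : (PySem.Int.toStr n).toList = Nat.toDigits 10 n.toNat := by
    rw [PySem.Int.toList_toStr, PySem.Int.toChars]
    simp [not_lt.mpr hn]
  rw [htl, Nat.toDigits, toDigitsCore_sum (n.toNat + 1) n.toNat [] (by omega)]
  simp [Int.toNat_of_nonneg hn]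

-- D_'s digit sum equals B's on nonnegative ints
lemma digits_sum_eq (m : Nat) : ((Nat.digits 10 m).sum : Int) = dsumAlt (m : Int) := by
  induction m using Nat.strong_induction_on with
  | _ m ih =>
    rcases Nat.eq_zero_or_pos m with rfl | hm
    · simp [dsumAlt_zero]
    · rw [Nat.digits_def' (by norm_num : (1:Nat) < 10) hm, dsumAlt_natCast m hm,
        ← ih (m / 10) (Nat.div_lt_self hm (by norm_num))]
      push_cast
      simp only [List.map_cons, List.sum_cons]
      push_cast
      ring

lemma dsumD_eq (n : Int) (hn : 0 ≤ n) : dsumD n = dsumAlt n := by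
  unfold dsumD
  rw [digits_sum_eq n.toNat, Int.toNat_of_nonneg hn]

-- the step function of A's loop, with digit sums taken by dsumAlt
def stepd (st : Int × Int) (x : Int) : Int × Int :=
  let add := dsumAlt x
  if add > st.2 then (x, add)
  else if add = st.2 then (min st.1 x, add)
  else st

-- loop invariant for A's fold: the state is (least attainer, max digit sum) over b :: l
lemma loopInv : ∀ (l : List Int) (b : Int),
    (l.foldl stepd (b, dsumAlt b)).1 ∈ b :: l ∧
    dsumAlt (l.foldl stepd (b, dsumAlt b)).1 = (l.foldl stepd (b, dsumAlt b)).2 ∧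
    (∀ y ∈ b :: l, dsumAlt y ≤ (l.foldl stepd (b, dsumAlt b)).2) ∧
    (∀ y ∈ b :: l, dsumAlt y = (l.foldl stepd (b, dsumAlt b)).2 →
        (l.foldl stepd (b, dsumAlt b)).1 ≤ y) := by
  intro l
  induction l with
  | nil =>
    intro b
    refine ⟨by simp, by simp, ?_, ?_⟩ <;> simp
  | cons x t ih =>
    intro b
    set b₁ : Int := if dsumAlt x > dsumAlt b then x
      else if dsumAlt x = dsumAlt b then min b x else b with hb₁
    have hstep : stepd (b, dsumAlt b) x = (b₁, dsumAlt b₁) := by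
      unfold stepd
      by_cases h1 : dsumAlt x > dsumAlt b
      · simp [hb₁, h1]
      · by_cases h2 : dsumAlt x = dsumAlt b
        · have : dsumAlt (min b x) = dsumAlt x := by
            rcases min_choice b x with h | h <;> rw [h] <;> omega
          simp [hb₁, h2, this]
        · simp [hb₁, h1, h2]
    have hmem : b₁ = b ∨ b₁ = x := by
      rcases min_choice b x with h | h <;>
        · simp only [hb₁]; split_ifs <;> simp [h]
    have hmax : dsumAlt b ≤ dsumAlt b₁ ∧ dsumAlt x ≤ dsumAlt b₁ := by
      have hmb : dsumAlt (min b x) = dsumAlt x ∨ dsumAlt (min b x) = dsumAlt b := by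
        rcases min_choice b x with h | h <;> rw [h] <;> simp
      simp only [hb₁]; split_ifs with h1 h2 <;> omega
    have hminb : dsumAlt b = dsumAlt b₁ → b₁ ≤ b := by
      intro he
      simp only [hb₁] at he ⊢
      split_ifs with h1 h2
      · simp only [if_pos h1] at he; omega
      · exact min_le_left _ _
      · omega
    have hminx : dsumAlt x = dsumAlt b₁ → b₁ ≤ x := by
      intro he
      simp only [hb₁] at he ⊢
      split_ifs with h1 h2
      · omega
      · exact min_le_right _ _
      · simp only [if_neg h1, if_neg h2] at he; omega
    have hfold : (x :: t).foldl stepd (b, dsumAlt b) = t.foldl stepd (b₁, dsumAlt b₁) := by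
      simp [List.foldl_cons, hstep]
    obtain ⟨m1, m2, m3, m4⟩ := ih b₁
    refine ⟨?_, ?_, ?_, ?_⟩ <;> rw [hfold]
    · rcases List.mem_cons.mp m1 with h | h
      · rw [h]; rcases hmem with hb | hb <;> rw [hb] <;> simp
      · exact List.mem_cons_of_mem _ (List.mem_cons_of_mem _ h)
    · exact m2
    · intro y hy
      rcases List.mem_cons.mp hy with rfl | hy'
      · exact le_trans hmax.1 (m3 b₁ (by simp))
      rcases List.mem_cons.mp hy' with rfl | hy''
      · exact le_trans hmax.2 (m3 b₁ (by simp))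
      · exact m3 y (by simp [hy''])
    · intro y hy he
      have hb₁top : dsumAlt b₁ ≤ (t.foldl stepd (b₁, dsumAlt b₁)).2 := m3 b₁ (by simp)
      rcases List.mem_cons.mp hy with rfl | hy'
      · have h1 : dsumAlt y ≤ dsumAlt b₁ := hmax.1
        have h2 : dsumAlt b₁ = (t.foldl stepd (b₁, dsumAlt b₁)).2 := by omega
        exact le_trans (m4 b₁ (by simp) h2) (hminb (by omega))
      rcases List.mem_cons.mp hy' with rfl | hy''
      · have h1 : dsumAlt y ≤ dsumAlt b₁ := hmax.2
        have h2 : dsumAlt b₁ = (t.foldl stepd (b₁, dsumAlt b₁)).2 := by omega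
        exact le_trans (m4 b₁ (by simp) h2) (hminx (by omega))
      · exact m4 y (by simp [hy'']) he

lemma dsumAlt_natCast' (n : Nat) : dsumAlt ((n : Nat) : Int) = if 0 < n then ((n % 10 : Nat) : Int) + dsumAlt ((n / 10 : Nat) : Int) else 0 := by
  by_cases h : 0 < n
  · rw [if_pos h]; exact dsumAlt_natCast n h
  · rw [if_neg h]
    have : n = 0 := by omega
    subst this
    exact dsumAlt_zero

lemma dsumAlt_100000 : dsumAlt 100000 = 1 := by
  have h0 := dsumAlt_zero
  have h1 := dsumAlt_natCast' 1
  have h10 := dsumAlt_natCast' 10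
  have h100 := dsumAlt_natCast' 100
  have h1000 := dsumAlt_natCast' 1000
  have h10000 := dsumAlt_natCast' 10000
  have h100000 := dsumAlt_natCast' 100000
  norm_num at h1 h10 h100 h1000 h10000 h100000
  omega

-- A's fold, rewritten over dsumAlt, for nonneg lists
lemma bestdiv_eq_fold (arr : List Int) (hpre : ∀ x ∈ arr, 0 ≤ x) :
    bestdiv arr = (arr.foldl stepd (100000, dsumAlt 100000)).1 := by
  have hA : bestdiv arr = (arr.foldl stepd (100000, 1)).1 := by
    unfold bestdiv
    congr 1
    apply PySem.List.foldl_congr_mem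
    intro acc x hx
    unfold stepd
    rw [asum_eq x (hpre x hx)]
  rw [hA, dsumAlt_100000]

-- B's two passes, given a nonempty list: the max is some mv attained in arr, and the
-- result is the min of the attainers
lemma bestdiv_alt_spec (arr : List Int) (hne : arr ≠ []) :
    ∃ mv w, PySem.List.max? (arr.map dsumAlt) (fun y => y) = some mv ∧
      (∃ y ∈ arr, dsumAlt y = mv) ∧ (∀ y ∈ arr, dsumAlt y ≤ mv) ∧
      w ∈ arr ∧ dsumAlt w = mv ∧
      (∀ y ∈ arr, dsumAlt y = mv → w ≤ y) ∧
      bestdiv_alt arr = w := by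
  obtain ⟨mv, hmv⟩ : ∃ mv, PySem.List.max? (arr.map dsumAlt) (fun y => y) = some mv := by
    rcases h : PySem.List.max? (arr.map dsumAlt) (fun y => y) with _ | mv
    · rw [PySem.List.max?_eq_none_iff] at h; simp at h; exact absurd h hne
    · exact ⟨mv, rfl⟩
  have hmem := PySem.List.max?_mem hmv
  obtain ⟨y0, hy0, hy0v⟩ := List.mem_map.mp hmem
  have hub : ∀ y ∈ arr, dsumAlt y ≤ mv := fun y hy =>
    PySem.List.max?_isMax hmv (dsumAlt y) (List.mem_map_of_mem hy)
  have hy0f : y0 ∈ arr.filter (fun x => dsumAlt x == mv) := by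
    rw [List.mem_filter]; exact ⟨hy0, by simp [hy0v]⟩
  obtain ⟨w, hw⟩ : ∃ w, PySem.List.min? (arr.filter (fun x => dsumAlt x == mv)) (fun y => y) = some w := by
    rcases h : PySem.List.min? (arr.filter (fun x => dsumAlt x == mv)) (fun y => y) with _ | w
    · rw [PySem.List.min?_eq_none_iff] at h; rw [h] at hy0f; simp at hy0f
    · exact ⟨w, rfl⟩
  have hwmem := PySem.List.min?_mem hw
  rw [List.mem_filter] at hwmem
  refine ⟨mv, w, hmv, ⟨y0, hy0, hy0v⟩, hub, hwmem.1, by simpa using hwmem.2, ?_, ?_⟩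
  · intro y hy hyv
    exact PySem.List.min?_isMin hw y (by rw [List.mem_filter]; exact ⟨hy, by simp [hyv]⟩)
  · unfold bestdiv_alt
    rw [hmv]
    simp only [Option.getD_some]
    rw [hw]
    simp

-- ===== VERDICT (by name: the statements are the Claim_ definitions above) =====
theorem bestdiv_spec : Claim_unchanged_bestdiv := by
  unfold Claim_unchanged_bestdiv
  intro arr _ hpre
  unfold Spec_bestdiv
  intro hnd
  obtain ⟨hne, hnn⟩ := hpre
  rw [bestdiv_eq_fold arr hnn]
  obtain ⟨m1, m2, m3, m4⟩ := loopInv arr 100000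
  set r := arr.foldl stepd (100000, dsumAlt 100000) with hr
  obtain ⟨mv, w, _, ⟨y0, hy0, hy0v⟩, hub, hwmem, hwv, hwmin, hBeq⟩ := bestdiv_alt_spec arr hne
  rw [hBeq]
  -- from ¬ D_: some x ∈ arr with dsumAlt x ≥ 2, or dsumAlt x = 1 ∧ x ≤ 100000
  have hx : ∃ x ∈ arr, 2 ≤ dsumAlt x ∨ (dsumAlt x = 1 ∧ x ≤ 100000) := by
    unfold D_bestdiv at hnd
    push_neg at hnd
    obtain ⟨x, hxm, hxp⟩ := hnd hne
    refine ⟨x, hxm, ?_⟩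
    rw [dsumD_eq x (hnn x hxm)] at hxp
    by_cases h2 : 2 ≤ dsumAlt x
    · exact Or.inl h2
    · exact Or.inr (hxp (by omega))
  -- key fact: A's result r.1 is an element of arr
  have hr1arr : r.1 ∈ arr := by
    rcases List.mem_cons.mp m1 with h | h
    · -- r.1 = 100000; then r.2 = 1 and the ¬D_ witness forces 100000 ∈ arr
      obtain ⟨x, hxm, hxc⟩ := hx
      have hr2 : r.2 = 1 := by
        have := m2; rw [h] at this; rw [← this, dsumAlt_100000]
      rcases hxc with h2 | ⟨h1, hle⟩
      · have := m3 x (List.mem_cons_of_mem _ hxm); omega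
      · have hle1 : r.1 ≤ x := m4 x (List.mem_cons_of_mem _ hxm) (by omega)
        have : x = 100000 := by rw [h] at hle1; omega
        rw [h, ← this]; exact hxm
    · exact h
  -- mv = r.2
  have hmv2 : mv = r.2 := by
    have h1 : mv ≤ r.2 := by
      rw [← hy0v]; exact m3 y0 (List.mem_cons_of_mem _ hy0)
    have h2 : r.2 ≤ mv := by rw [← m2]; exact hub r.1 hr1arr
    omega
  -- w = r.1
  have h1 : r.1 ≤ w := m4 w (List.mem_cons_of_mem _ hwmem) (by omega)
  have h2 : w ≤ r.1 := hwmin r.1 hr1arr (by omega)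
  omega

theorem bestdiv_changed : Claim_changed_bestdiv := by
  unfold Claim_changed_bestdiv
  refine ⟨by decide, by decide, ?_, by decide, ?_, by decide⟩
  · refine ⟨by decide, ?_⟩
    intro x hx
    have : x = 0 := by simpa [pvDiffWitness_bestdiv] using hx
    subst this
    refine ⟨by norm_num [dsumD], by norm_num [dsumD]⟩
  · show bestdiv_alt [0] = 0
    obtain ⟨mv, w, hmv, ⟨y0, hy0, hy0v⟩, _, hwmem, _, _, hBeq⟩ :=
      bestdiv_alt_spec [0] (by decide)
    rw [hBeq]
    simpa using hwmem

theorem bestdiv_tight : Claim_exact_bestdiv := by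
  unfold Claim_exact_bestdiv
  intro arr _ hpre hd
  obtain ⟨hne, hnn⟩ := hpre
  obtain ⟨-, hdall⟩ := hd
  have hdall' : ∀ x ∈ arr, dsumAlt x ≤ 1 ∧ (dsumAlt x = 1 → 100000 < x) := by
    intro x hx
    have := hdall x hx
    rwa [dsumD_eq x (hnn x hx)] at this
  rw [bestdiv_eq_fold arr hnn]
  obtain ⟨m1, m2, m3, m4⟩ := loopInv arr 100000
  set r := arr.foldl stepd (100000, dsumAlt 100000) with hr
  obtain ⟨mv, w, _, _, _, hwmem, hwv, _, hBeq⟩ := bestdiv_alt_spec arr hne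
  rw [hBeq]
  -- A's result is the leftover 100000
  have hr2 : r.2 = 1 := by
    have hub : dsumAlt 100000 ≤ r.2 := m3 100000 (by simp)
    have : dsumAlt r.1 ≤ 1 := by
      rcases List.mem_cons.mp m1 with h | h
      · rw [h, dsumAlt_100000]
      · exact (hdall' r.1 h).1
    rw [dsumAlt_100000] at hub
    omega
  have hA : r.1 = 100000 := by
    rcases List.mem_cons.mp m1 with h | h
    · exact h
    · -- an element of arr with digit sum r.2 = 1 exceeds 100000, yet r.1 ≤ 100000
      have h1 : dsumAlt r.1 = 1 := by rw [m2, hr2]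
      have h2 : 100000 < r.1 := (hdall' r.1 h).2 h1
      have h3 : r.1 ≤ 100000 := m4 100000 (by simp) (by rw [dsumAlt_100000, hr2])
      omega
  -- B's result is an element of arr, never 100000
  have hB : w ≠ 100000 := by
    intro hw
    have := (hdall' w hwmem).2
    rw [hw] at this
    rw [hw, dsumAlt_100000] at hwv
    -- dsumAlt 100000 = 1 so the D_ condition gives 100000 < 100000
    have := (hdall' w hwmem).2 (by rw [hw, dsumAlt_100000])
    rw [hw] at this
    omega
  rw [hA]
  exact fun h => hB h.symm
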